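-- pv_equiv track=rewrite | github.com/breathinlee/TIL | algorithm/etc/nh2.py | solve
-- ===== SOURCE A (Python) =====
-- def solve(arr):
--     answer = dict()
--     result = 0
--
--     for k in arr:
--         k = tuple(k)
--         if k in answer:
--             answer[k] += 1
--         else:
--             answer[k] = 1
--
--     for key, value in answer.items():
--         if value > 1:
--             result += (value - 1)
--
--     return result
-- ===== SOURCE B (Python) =====
-- def solve(arr):
--     total = 0
--     distinct = set()
--     for k in arr:
--         distinct.add(tuple(k))
--         total += 1
--     return total - len(distinct)
-- ===== Notes on version B (the rewrite author's own statement) =====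
-- stated objective: simpler
-- what changed: One pass keeping only a running total and a set of distinct rows, returning total - len(distinct) (the identity sum(count-1) = n - distinct), instead of building a count dict and a second loop over its items.
import Mathlib
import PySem

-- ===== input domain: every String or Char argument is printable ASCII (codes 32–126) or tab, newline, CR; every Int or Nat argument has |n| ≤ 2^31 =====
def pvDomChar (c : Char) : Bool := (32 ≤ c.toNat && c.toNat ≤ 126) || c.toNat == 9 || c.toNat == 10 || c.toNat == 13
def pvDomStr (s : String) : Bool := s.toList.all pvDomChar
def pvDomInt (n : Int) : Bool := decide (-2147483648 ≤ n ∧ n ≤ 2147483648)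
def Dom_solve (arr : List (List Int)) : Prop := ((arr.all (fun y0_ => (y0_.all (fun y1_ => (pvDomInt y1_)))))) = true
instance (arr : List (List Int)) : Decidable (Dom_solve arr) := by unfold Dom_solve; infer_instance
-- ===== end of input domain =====

-- B replaces A's count-dict plus second aggregation loop with one pass keeping a running
-- total and a set of distinct rows, returning total - len(distinct).

-- ===== PORT A =====
-- two loops: build a count dict, then sum (value - 1) over entries with value > 1
def solve (arr : List (List Int)) : Int :=
  let answer := arr.foldl
    (fun d k => if d.contains k then d.insert k (d.getD k 0 + 1) else d.insert k 1)
    PySem.Dict.empty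
  answer.items.foldl (fun result kv => if kv.2 > 1 then result + (kv.2 - 1) else result) 0

-- ===== PORT B =====
-- one loop: running total and set of distinct rows, then one subtraction
def solve_alt (arr : List (List Int)) : Int :=
  let st := arr.foldl
    (fun (p : Int × PySem.Set (List Int)) k => (p.1 + 1, PySem.Set.add p.2 k))
    ((0 : Int), (PySem.Set.empty : PySem.Set (List Int)))
  st.1 - (st.2.length : Int)

-- ===== PRECONDITION & SPEC =====
def Spec_solve (arr : List (List Int)) (out : Int) : Prop := out = solve_alt arr
instance (arr : List (List Int)) (out : Int) : Decidable (Spec_solve arr out) := by unfold Spec_solve; infer_instance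

-- ===== CLAIM (what is proved, stated in full; the proofs are below) =====
def Claim_equal_solve : Prop := ∀ (arr : List (List Int)), Dom_solve arr → Spec_solve arr (solve arr)

-- ===== LEMMAS AND PROOFS =====

-- A's loop body is the insert-getD-increment counter step
lemma stepA_eq (d : PySem.Dict (List Int) Int) (k : List Int) :
    (if d.contains k then d.insert k (d.getD k 0 + 1) else d.insert k 1)
      = d.insert k (d.getD k 0 + 1) := by
  by_cases h : d.contains k = true
  · simp [h]
  · have hc : d.contains k = false := by simpa using h
    rw [PySem.Dict.getD_of_not_contains d 0 hc]
    simp [hc]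

-- B's loop computes (length, set of distinct rows)
lemma foldB (arr : List (List Int)) : ∀ (t : Int) (s : PySem.Set (List Int)),
    arr.foldl (fun (p : Int × PySem.Set (List Int)) k => (p.1 + 1, PySem.Set.add p.2 k)) (t, s)
      = (t + arr.length, arr.foldl PySem.Set.add s) := by
  induction arr with
  | nil => intro t s; simp
  | cons a l ih =>
      intro t s
      simp only [List.foldl_cons, ih, List.length_cons]
      refine Prod.ext ?_ rfl
      push_cast; ring

lemma solve_alt_eq (arr : List (List Int)) :
    solve_alt arr = (arr.length : Int) - ((PySem.Set.ofList arr).length : Int) := by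
  simp [solve_alt, foldB, PySem.Set.ofList_eq_foldl]

-- A's aggregation loop over (key, count) pairs with all counts ≥ 1 adds count - 1 per key
lemma fold_items (arr : List (List Int)) :
    ∀ (s : List (List Int)) (r : Int), (∀ k ∈ s, 1 ≤ arr.count k) →
    (s.map (fun k => (k, (arr.count k : Int)))).foldl
        (fun result kv => if kv.2 > 1 then result + (kv.2 - 1) else result) r
      = r + (s.map (fun k => ((arr.count k : Int) - 1))).sum := by
  intro s
  induction s with
  | nil => intro r _; simp
  | cons a l ih =>
      intro r h
      have ha : 1 ≤ arr.count a := h a (by simp)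
      simp only [List.map_cons, List.foldl_cons, List.sum_cons]
      by_cases hgt : (1 : Int) < (arr.count a : Int)
      · rw [if_pos hgt, ih _ (fun k hk => h k (by simp [hk]))]; ring
      · have h1 : (arr.count a : Int) = 1 := by
          have : (1 : Int) ≤ (arr.count a : Int) := by exact_mod_cast ha
          omega
        rw [if_neg hgt, ih _ (fun k hk => h k (by simp [hk])), h1]; ring

-- sum of counts over the distinct rows is the length of arr
lemma sum_counts (arr : List (List Int)) :
    ((PySem.Set.ofList arr).map (fun k => ((arr.count k : Nat) : Int))).sum
      = (arr.length : Int) := by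
  have hperm : (PySem.Set.ofList arr).Perm arr.dedup := by
    rw [List.perm_ext_iff_of_nodup (PySem.Set.nodup_ofList arr) arr.nodup_dedup]
    intro a
    simp [PySem.Set.mem_ofList, List.mem_dedup]
  have h1 : ((PySem.Set.ofList arr).map (fun k => ((arr.count k : Nat) : Int))).sum
      = ((arr.dedup).map (fun k => ((arr.count k : Nat) : Int))).sum :=
    (hperm.map _).sum_eq
  rw [h1]
  have h2 := List.sum_map_count_dedup_eq_length arr
  have := congrArg (fun n : Nat => (n : Int)) h2
  simpa [Nat.cast_list_sum, List.map_map, Function.comp_def, List.count_eq_countP, beq_eq_decide] using this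

lemma sum_sub_one (arr : List (List Int)) (s : List (List Int)) :
    (s.map (fun k => ((arr.count k : Int) - 1))).sum
      = (s.map (fun k => ((arr.count k : Nat) : Int))).sum - s.length := by
  induction s with
  | nil => simp
  | cons a l ih => simp [ih]; ring

lemma solve_eq (arr : List (List Int)) :
    solve arr = (arr.length : Int) - ((PySem.Set.ofList arr).length : Int) := by
  have hstep : (fun (d : PySem.Dict (List Int) Int) k =>
      if d.contains k then d.insert k (d.getD k 0 + 1) else d.insert k 1)
      = (fun d k => d.insert k (d.getD k 0 + 1)) := by
    funext d k; exact stepA_eq d k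
  have hc : arr.foldl
      (fun d k => if d.contains k then d.insert k (d.getD k 0 + 1) else d.insert k 1)
      PySem.Dict.empty = PySem.Dict.counter arr := by
    rw [hstep]; exact PySem.Dict.foldl_insert_getD_add_one_eq_counter arr
  have hcount : ∀ k ∈ PySem.Set.ofList arr, 1 ≤ arr.count k := by
    intro k hk
    exact List.count_pos_iff.mpr ((PySem.Set.mem_ofList arr k).mp hk)
  simp only [solve, hc, PySem.Dict.items_counter]
  rw [fold_items arr _ 0 hcount, sum_sub_one, sum_counts]
  ring

-- ===== VERDICT (by name: the statement is the Claim_ definition above) =====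
theorem solve_spec : Claim_equal_solve := by
  intro arr _
  unfold Spec_solve
  rw [solve_eq, solve_alt_eq]
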